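-- pv_equiv track=rewrite | github.com/narendramishra91/Page-Rank- | keyword_finder_2.py | clean_wordlist_special_symbol
-- ===== SOURCE A (Python) =====
-- def clean_wordlist_special_symbol(wordlist):
--
--     clean_list =[]
--     for word in wordlist or []:
--         symbols = '!@#$%^&*()_-+={[}]|\;:"<>?/., '
--
--         for i in range (0, len(symbols)):
--             word = word.replace(symbols[i], '')
--
--         if len(word) > 0:
--             clean_list.append(word)
--     return clean_list
-- ===== SOURCE B (Python) =====
-- SYMBOLS = set('!@#$%^&*()_-+={[}]|\\;:"<>?/., ')
--
-- def clean_wordlist_special_symbol(wordlist):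
--     # one membership-filter pass per word, then drop the empties: map + filter
--     cleaned = [''.join(c for c in w if c not in SYMBOLS) for w in (wordlist or [])]
--     return [w for w in cleaned if w != '']
-- ===== Notes on version B (the rewrite author's own statement) =====
-- stated objective: faster
-- what changed: B replaces A's accumulator loop of ~30 whole-string str.replace passes per word by a map of one set-membership character filter per word followed by a filter dropping empty strings.
import Mathlib
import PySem

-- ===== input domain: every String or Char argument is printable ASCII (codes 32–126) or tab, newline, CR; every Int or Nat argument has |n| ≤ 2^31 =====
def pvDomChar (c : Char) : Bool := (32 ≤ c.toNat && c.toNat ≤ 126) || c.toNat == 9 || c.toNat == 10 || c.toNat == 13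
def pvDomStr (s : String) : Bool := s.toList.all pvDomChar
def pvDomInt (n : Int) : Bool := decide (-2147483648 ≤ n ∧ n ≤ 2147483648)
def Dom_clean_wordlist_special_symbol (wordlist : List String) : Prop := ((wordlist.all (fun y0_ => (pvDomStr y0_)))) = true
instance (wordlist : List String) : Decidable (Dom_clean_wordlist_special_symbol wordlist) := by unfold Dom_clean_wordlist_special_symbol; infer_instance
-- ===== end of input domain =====

-- One honest line: B maps one set-membership character filter over the words and then filters out empties, instead of A's accumulator loop of ~30 whole-string replace passes; objective: faster (constant factor).

-- ===== PORT A =====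
-- the literal symbol string of A ('\;' in the Python source is backslash followed by ';')
def pvSymbols : String := "!@#$%^&*()_-+={[}]|\\;:\"<>?/., "

-- A's inner loop: for i in range(0, len(symbols)): word = word.replace(symbols[i], '')
-- (pyGetD's default is never used: i ranges over valid indices of pvSymbols)
def pvCleanA (word : String) : List Char :=
  (PySem.List.pyRange 0 (PySem.Str.len pvSymbols) 1).foldl
    (fun w i => PySem.Chars.replace w [PySem.List.pyGetD pvSymbols.toList i ' '] []) word.toList

def clean_wordlist_special_symbol (wordlist : List String) : List String :=
  wordlist.foldl
    (fun clean_list word =>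
      if (pvCleanA word).length > 0 then clean_list ++ [String.ofList (pvCleanA word)] else clean_list)
    []

-- ===== PORT B =====
-- SYMBOLS = set('!@#$%^&*()_-+={[}]|\;:"<>?/., ')
def pvSymSet : PySem.Set Char := PySem.Set.ofList pvSymbols.toList

-- ''.join(c for c in w if c not in SYMBOLS)
def pvStrip (w : String) : String :=
  String.ofList (w.toList.filter (fun c => !(pvSymSet.contains c)))

-- [''.join(...) for w in (wordlist or [])] ; then [w for w in cleaned if w != '']
def clean_wordlist_special_symbol_alt (wordlist : List String) : List String :=
  (wordlist.map pvStrip).filter (fun w => w != "")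

-- ===== PRECONDITION & SPEC =====
def Spec_clean_wordlist_special_symbol (wordlist : List String) (out : List String) : Prop := out = clean_wordlist_special_symbol_alt wordlist
instance (wordlist : List String) (out : List String) : Decidable (Spec_clean_wordlist_special_symbol wordlist out) := by unfold Spec_clean_wordlist_special_symbol; infer_instance

-- ===== CLAIM (what is proved, stated in full; the proofs are below) =====
def Claim_equal_clean_wordlist_special_symbol : Prop := ∀ (wordlist : List String), Dom_clean_wordlist_special_symbol wordlist → Spec_clean_wordlist_special_symbol wordlist (clean_wordlist_special_symbol wordlist)

-- ===== LEMMAS AND PROOFS =====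

-- replace.go for a single-char pattern and empty replacement removes every occurrence
theorem pv_go_filter (c : Char) : ∀ (l : List Char) (fuel : Nat) (acc : List Char),
    l.length ≤ fuel →
    PySem.Chars.replace.go [c] [] fuel l acc = acc.reverse ++ l.filter (fun x => x != c) := by
  intro l
  induction l with
  | nil =>
    intro fuel acc _
    cases fuel <;> simp [PySem.Chars.replace.go]
  | cons a t ih =>
    intro fuel acc h
    cases fuel with
    | zero => simp at h
    | succ f =>
      simp only [PySem.Chars.replace.go]
      by_cases hac : c = a
      · subst hac
        simp only [List.isPrefixOf, beq_self_eq_true, Bool.true_and,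
          if_true, List.length_cons, List.length_nil, Nat.zero_add, List.drop_succ_cons,
          List.drop_zero, List.reverse_nil, List.nil_append]
        rw [ih f acc (by simpa using h)]
        simp
      · have hbeq : ([c].isPrefixOf (a :: t)) = false := by
          simp [List.isPrefixOf]; exact hac
        rw [hbeq]
        simp only [Bool.false_eq_true, if_false]
        rw [ih f (a :: acc) (by simpa using h)]
        have hne : (a != c) = true := by simp [bne]; exact fun h' => hac h'.symm
        simp [hne]

-- word.replace(c, '') for a single character c is a filter
theorem pv_replace_single (w : List Char) (c : Char) :
    PySem.Chars.replace w [c] [] = w.filter (fun x => x != c) := by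
  rw [PySem.Chars.replace]
  simp only [List.isEmpty_cons, Bool.false_eq_true, if_false]
  exact pv_go_filter c w w.length [] (le_refl _)

-- folding successive single-character removals = one membership filter
theorem pv_foldl_filter (syms : List Char) : ∀ (w : List Char),
    syms.foldl (fun w c => w.filter (fun x => x != c)) w
      = w.filter (fun x => !(syms.contains x)) := by
  induction syms with
  | nil => intro w; simp
  | cons c cs ih =>
    intro w
    simp only [List.foldl_cons, ih, List.filter_filter]
    congr 1
    funext x
    by_cases hx : x = c <;> simp [hx]

-- A's per-word cleaning equals B's per-word filter
theorem pv_clean_eq (word : String) : pvCleanA word = (pvStrip word).toList := by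
  unfold pvCleanA pvStrip
  rw [show PySem.Str.len pvSymbols = pvSymbols.toList.length from PySem.Str.len_eq pvSymbols]
  rw [PySem.List.foldl_pyRange_zero_pyGetD'
    (f := fun w c => PySem.Chars.replace w [c] []) (xs := pvSymbols.toList) (d := ' ')
    (init := word.toList)]
  simp only [pv_replace_single]
  rw [pv_foldl_filter]
  simp only [String.toList_ofList]
  apply List.filter_congr
  intro x _
  simp [pvSymSet, PySem.Set.mem_ofList]

-- A's word loop, with the accumulator generalized, produces B's map-then-filter
theorem pv_foldl_eq : ∀ (l : List String) (acc : List String),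
    l.foldl
      (fun clean_list word =>
        if (pvCleanA word).length > 0 then clean_list ++ [String.ofList (pvCleanA word)] else clean_list)
      acc
      = acc ++ (l.map pvStrip).filter (fun w => w != "") := by
  intro l
  induction l with
  | nil => intro acc; simp
  | cons w t ih =>
    intro acc
    have hmk : String.ofList (pvCleanA w) = pvStrip w := by
      rw [pv_clean_eq, String.ofList_toList]
    have hlen : ((pvCleanA w).length > 0) ↔ (pvStrip w ≠ "") := by
      rw [pv_clean_eq, ne_eq, ← String.toList_eq_nil_iff]
      cases (pvStrip w).toList <;> simp
    simp only [List.foldl_cons, List.map_cons, List.filter_cons, hmk]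
    by_cases hc : pvStrip w = ""
    · have hneg : ¬ ((pvCleanA w).length > 0) := by rw [hlen]; simp [hc]
      rw [if_neg hneg, ih]
      simp [hc]
    · have h1 : (pvCleanA w).length > 0 := hlen.mpr hc
      rw [if_pos h1, ih]
      have hb : (pvStrip w != "") = true := by simp [hc]
      simp [hb]

-- ===== VERDICT (by name: the statement is the Claim_ definition above) =====
theorem clean_wordlist_special_symbol_spec : Claim_equal_clean_wordlist_special_symbol := by
  intro wordlist _
  unfold Spec_clean_wordlist_special_symbol clean_wordlist_special_symbol clean_wordlist_special_symbol_alt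
  simpa using pv_foldl_eq wordlist []
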